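-- pv_equiv track=rewrite | github.com/heyitstowler/advent-of-code-2019 | day4.py | crack_code_v2
-- ===== SOURCE A (Python) =====
-- def crack_code_v2(minimum, maximum):
--   valid = 0
--   for i in range(1,10):
--     for j in range(i, 10):
--       for k in range(j, 10):
--         for l in range(k, 10):
--           for m in range(l, 10):
--             for n in range(m, 10):
--               number = i * 100000 + j * 10000 + k * 1000 + l * 100 + m * 10 + n
--               if number < minimum:
--                 continue
--               if number > maximum:
--                 break
--               if i is j and j is not k:
--                 valid += 1
--                 continue
--
--               if i is not j and j is k and k is not l:
--                 valid += 1
--                 continue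
--               if j is not k and k is l and l is not m:
--                 valid += 1
--                 continue
--               if k is not l and l is m and m is not n:
--                 valid += 1
--                 continue
--               if l is not m and m is n:
--                 valid += 1
--                 continue
--               else:
--                 continue
--   return valid
-- ===== SOURCE B (Python) =====
-- def _dig(num, p):
--     """Digit p (0 = most significant) of the 6-digit number num."""
--     return num // 10 ** (5 - p) % 10
--
--
-- def crack_code_v2(minimum, maximum):
--     lo = max(minimum, 111111)
--     hi = min(maximum, 999999)
--     count = 0
--     for num in range(lo, hi + 1):
--         if all(_dig(num, p) <= _dig(num, p + 1) for p in range(5)):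
--             if any(_dig(num, p) == _dig(num, p + 1)
--                    and (p == 0 or _dig(num, p - 1) != _dig(num, p))
--                    and (p == 4 or _dig(num, p + 1) != _dig(num, p + 2))
--                    for p in range(5)):
--                 count += 1
--     return count
-- ===== Notes on version B (the rewrite author's own statement) =====
-- stated objective: idiomatic
-- what changed: Replaced the six nested combinatorial digit loops with their five hand-coded adjacency branches, break and continue by a single linear scan of the clamped range [max(minimum,111111), min(maximum,999999)] that tests each number's digits for being non-decreasing and containing a run of exactly two equal digits.
import Mathlib
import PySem

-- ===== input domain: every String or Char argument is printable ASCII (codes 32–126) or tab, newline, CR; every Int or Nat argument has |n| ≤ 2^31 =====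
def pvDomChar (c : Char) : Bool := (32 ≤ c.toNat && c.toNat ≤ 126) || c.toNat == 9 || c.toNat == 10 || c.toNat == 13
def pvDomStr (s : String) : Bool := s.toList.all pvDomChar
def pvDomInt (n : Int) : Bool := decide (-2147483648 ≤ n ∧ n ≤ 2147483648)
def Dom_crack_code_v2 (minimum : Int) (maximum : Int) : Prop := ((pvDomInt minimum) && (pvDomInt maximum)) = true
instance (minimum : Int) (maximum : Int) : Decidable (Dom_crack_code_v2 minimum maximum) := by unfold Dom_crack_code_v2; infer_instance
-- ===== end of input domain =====

-- B replaces A's six nested digit loops (with break/continue) by a direct scan of the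
-- clamped integer range [max(minimum,111111), min(maximum,999999)] with an index-based
-- digit test (objective: idiomatic; not faster).


-- ===== PORT A =====
-- Python's `is` / `is not` here compares ints 0..9, which CPython caches, so it is == / !=.
-- The innermost `for n` loop with its `break` is this structural recursion (break = stop, return valid).
def innerA (minimum maximum i j k l m : Int) : List Int → Int → Int
  | [], valid => valid
  | n :: ns, valid =>
    let number := i * 100000 + j * 10000 + k * 1000 + l * 100 + m * 10 + n
    if number < minimum then innerA minimum maximum i j k l m ns valid
    else if number > maximum then valid
    else if i == j && j != k then innerA minimum maximum i j k l m ns (valid + 1)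
    else if i != j && j == k && k != l then innerA minimum maximum i j k l m ns (valid + 1)
    else if j != k && k == l && l != m then innerA minimum maximum i j k l m ns (valid + 1)
    else if k != l && l == m && m != n then innerA minimum maximum i j k l m ns (valid + 1)
    else if l != m && m == n then innerA minimum maximum i j k l m ns (valid + 1)
    else innerA minimum maximum i j k l m ns valid

def crack_code_v2 (minimum : Int) (maximum : Int) : Int :=
  (PySem.List.pyRange 1 10 1).foldl (fun valid i =>
    (PySem.List.pyRange i 10 1).foldl (fun valid j =>
      (PySem.List.pyRange j 10 1).foldl (fun valid k =>
        (PySem.List.pyRange k 10 1).foldl (fun valid l =>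
          (PySem.List.pyRange l 10 1).foldl (fun valid m =>
            innerA minimum maximum i j k l m (PySem.List.pyRange m 10 1) valid)
            valid) valid) valid) valid) 0

-- ===== PORT B =====
-- _dig(num, p) = num // 10 ** (5 - p) % 10; every call Python actually evaluates has 0 ≤ 5 - p
-- (short-circuit guards p == 0 / p == 4), so `(5 - p).toNat` is exact there.
def pvDig (num : Int) (p : Int) : Int :=
  PySem.Int.mod (PySem.Int.floordiv num ((10 : Int) ^ (5 - p).toNat)) 10

def crack_code_v2_alt (minimum : Int) (maximum : Int) : Int :=
  let lo := max minimum 111111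
  let hi := min maximum 999999
  (PySem.List.pyRange lo (hi + 1) 1).foldl
    (fun count num =>
      if (PySem.List.pyRange 0 5 1).all
           (fun p => decide (pvDig num p ≤ pvDig num (p + 1))) then
        if (PySem.List.pyRange 0 5 1).any
             (fun p =>
               pvDig num p == pvDig num (p + 1)
               && (p == 0 || pvDig num (p - 1) != pvDig num p)
               && (p == 4 || pvDig num (p + 1) != pvDig num (p + 2))) then
          count + 1
        else count
      else count)
    0

-- ===== PRECONDITION & SPEC =====
def Spec_crack_code_v2 (minimum : Int) (maximum : Int) (out : Int) : Prop := out = crack_code_v2_alt minimum maximum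
instance (minimum : Int) (maximum : Int) (out : Int) : Decidable (Spec_crack_code_v2 minimum maximum out) := by unfold Spec_crack_code_v2; infer_instance

-- ===== CLAIM (what is proved, stated in full; the proofs are below) =====
def Claim_equal_crack_code_v2 : Prop := ∀ (minimum : Int) (maximum : Int), Dom_crack_code_v2 minimum maximum → Spec_crack_code_v2 minimum maximum (crack_code_v2 minimum maximum)

-- ===== LEMMAS AND PROOFS =====

def pvRng (a b : Int) : List Int := PySem.List.pyRange a b 1

def pvS (l : List Int) (f : Int → Int) : Int := (l.map f).sum

theorem pvS_zero (l : List Int) (f : Int → Int) (h : ∀ x ∈ l, f x = 0) : pvS l f = 0 := by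
  unfold pvS
  apply List.sum_eq_zero
  intro x hx
  rcases List.mem_map.mp hx with ⟨y, hy, rfl⟩
  exact h y hy

theorem pvS_append (l₁ l₂ : List Int) (f : Int → Int) :
    pvS (l₁ ++ l₂) f = pvS l₁ f + pvS l₂ f := by
  simp [pvS]

theorem pvS_congr (l : List Int) (f g : Int → Int) (h : ∀ x ∈ l, f x = g x) :
    pvS l f = pvS l g := by
  unfold pvS; rw [List.map_congr_left h]

theorem pvS_lev (p : Int) (h0 : 0 ≤ p) (h1 : p ≤ 10) (f : Int → Int) :
    pvS (pvRng p 10) f = pvS (pvRng 0 10) (fun d => if p ≤ d then f d else 0) := by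
  unfold pvRng
  rw [PySem.List.pyRange_one_append 0 p 10 h0 h1]
  rw [show PySem.List.pyRange 0 p 1 ++ PySem.List.pyRange p 10 1 = (PySem.List.pyRange 0 p 1) ++ (PySem.List.pyRange p 10 1) from rfl]
  rw [pvS_append]
  rw [pvS_zero (PySem.List.pyRange 0 p 1) _ (fun x hx => by
    have := (PySem.List.mem_pyRange_one.mp hx).2
    simp [show ¬ p ≤ x by omega])]
  rw [zero_add]
  exact (pvS_congr _ _ _ (fun x hx => by
    have := (PySem.List.mem_pyRange_one.mp hx).1
    simp [this])).symm

theorem pvS_map {α : Type} (l : List α) (g : α → Int) (f : Int → Int) :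
    pvS (l.map g) f = (l.map (fun x => f (g x))).sum := by
  simp only [pvS, List.map_map]
  rfl

theorem pvS_shift (c : Int) (f : Int → Int) :
    pvS (pvRng c (c + 10)) f = pvS (pvRng 0 10) (fun r => f (c + r)) := by
  unfold pvRng
  rw [PySem.List.pyRange_one c (c + 10), PySem.List.pyRange_one 0 10]
  rw [pvS_map, pvS_map]
  norm_num

theorem pvS_dec (a b : Int) (f : Int → Int) :
    pvS (pvRng (10 * a) (10 * b)) f
      = pvS (pvRng a b) (fun q => pvS (pvRng 0 10) (fun r => f (10 * q + r))) := by
  generalize hn : (b - a).toNat = n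
  induction n generalizing b with
  | zero =>
    unfold pvRng
    rw [PySem.List.pyRange_one_eq_nil (by omega : (10*b : Int) ≤ 10*a),
        PySem.List.pyRange_one_eq_nil (by omega : b ≤ a)]
    rfl
  | succ n ih =>
    have hab : a < b := by omega
    have h1 : pvRng a b = pvRng a (b - 1) ++ [b - 1] := by
      unfold pvRng
      have h := PySem.List.pyRange_one_succ_right (a := a) (b := b - 1) (by omega)
      have hb : b - 1 + 1 = b := by omega
      rw [hb] at h; exact h
    have h2 : pvRng (10 * a) (10 * b) = pvRng (10 * a) (10 * (b - 1)) ++ pvRng (10 * (b - 1)) (10 * b) := by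
      unfold pvRng
      exact PySem.List.pyRange_one_append _ _ _ (by omega) (by omega)
    rw [h1, h2, pvS_append, pvS_append, ih (b - 1) (by omega)]
    have h3 : pvS (pvRng (10 * (b - 1)) (10 * b)) f
        = pvS (pvRng 0 10) (fun r => f (10 * (b - 1) + r)) := by
      have hb : (10 : Int) * b = 10 * (b - 1) + 10 := by ring
      rw [hb]; exact pvS_shift _ _
    rw [h3]
    simp [pvS]

def pvNum6 (i j k l m n : Int) : Int := i * 100000 + j * 10000 + k * 1000 + l * 100 + m * 10 + n

def pvCondA (i j k l m n : Int) : Bool :=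
  (i == j && j != k) || (i != j && j == k && k != l) || (j != k && k == l && l != m)
    || (k != l && l == m && m != n) || (l != m && m == n)

def pvBnd (minimum maximum x : Int) : Bool := decide (minimum ≤ x) && decide (x ≤ maximum)

def pvFA (minimum maximum i j k l m n : Int) : Int :=
  if pvBnd minimum maximum (pvNum6 i j k l m n) && pvCondA i j k l m n then 1 else 0

theorem pvS_cons (x : Int) (l : List Int) (f : Int → Int) :
    pvS (x :: l) f = f x + pvS l f := by simp [pvS]

theorem innerA_eq (minimum maximum i j k l m : Int) (ns : List Int)
    (hs : ns.Pairwise (· ≤ ·)) (valid : Int) :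
    innerA minimum maximum i j k l m ns valid
      = valid + pvS ns (fun n => pvFA minimum maximum i j k l m n) := by
  induction ns generalizing valid with
  | nil => simp [innerA, pvS]
  | cons n ns ih =>
    rw [List.pairwise_cons] at hs
    obtain ⟨hn, hs'⟩ := hs
    rw [pvS_cons]
    by_cases hlt : i * 100000 + j * 10000 + k * 1000 + l * 100 + m * 10 + n < minimum
    · simp only [innerA, if_pos hlt]
      rw [ih hs']
      have : pvFA minimum maximum i j k l m n = 0 := by
        simp [pvFA, pvBnd, pvNum6, show ¬ minimum ≤ i * 100000 + j * 10000 + k * 1000 + l * 100 + m * 10 + n by omega]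
      rw [this]; ring
    · by_cases hgt : i * 100000 + j * 10000 + k * 1000 + l * 100 + m * 10 + n > maximum
      · simp only [innerA, if_neg hlt, if_pos hgt]
        have h0 : pvFA minimum maximum i j k l m n = 0 := by
          simp [pvFA, pvBnd, pvNum6, show ¬ i * 100000 + j * 10000 + k * 1000 + l * 100 + m * 10 + n ≤ maximum by omega]
        have h1 : pvS ns (fun n => pvFA minimum maximum i j k l m n) = 0 := by
          apply pvS_zero
          intro y hy
          have hny := hn y hy
          simp [pvFA, pvBnd, pvNum6, show ¬ i * 100000 + j * 10000 + k * 1000 + l * 100 + m * 10 + y ≤ maximum by omega]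
        rw [h0, h1]; ring
      · have hF : pvFA minimum maximum i j k l m n
            = if pvCondA i j k l m n then 1 else 0 := by
          simp [pvFA, pvBnd, pvNum6, show minimum ≤ i * 100000 + j * 10000 + k * 1000 + l * 100 + m * 10 + n by omega,
                show i * 100000 + j * 10000 + k * 1000 + l * 100 + m * 10 + n ≤ maximum by omega]
        simp only [innerA, if_neg hlt, if_neg hgt]
        cases hc1 : (i == j && j != k)
          <;> cases hc2 : (i != j && j == k && k != l)
          <;> cases hc3 : (j != k && k == l && l != m)
          <;> cases hc4 : (k != l && l == m && m != n)
          <;> cases hc5 : (l != m && m == n)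
          <;> simp only [hc1, hc2, hc3, hc4, hc5, if_true, if_false, Bool.false_eq_true, ite_true, ite_false]
          <;> rw [ih hs', hF]
          <;> simp [pvCondA, hc1, hc2, hc3, hc4, hc5]
          <;> ring

theorem pvS_guard (c : Prop) [Decidable c] (l : List Int) (f : Int → Int) :
    pvS l (fun x => if c then f x else 0) = if c then pvS l f else 0 := by
  by_cases hc : c
  · simp [hc]
  · simp only [hc, if_false]
    exact pvS_zero _ _ (fun x _ => by simp [hc])

theorem pvS_foldl (l : List Int) (g : Int → Int) (a : Int) :
    l.foldl (fun acc x => acc + g x) a = a + pvS l g :=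
  PySem.List.foldl_add l g a

theorem foldl_S (L : List Int) (body : Int → Int → Int) (g : Int → Int) (a : Int)
    (h : ∀ x ∈ L, ∀ acc, body acc x = acc + g x) : L.foldl body a = a + pvS L g :=
  (PySem.List.foldl_congr_mem' L body (fun acc x => acc + g x) a h).trans (pvS_foldl L g a)

theorem pvRng_def (a b : Int) : PySem.List.pyRange a b 1 = pvRng a b := rfl

theorem pvRng_pairwise (a b : Int) : (pvRng a b).Pairwise (· ≤ ·) :=
  (PySem.List.pairwise_lt_pyRange_one a b).imp (fun h => le_of_lt h)

theorem lemA5 (mn mx i j k l acc : Int) :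
    (pvRng l 10).foldl (fun valid m => innerA mn mx i j k l m (pvRng m 10) valid) acc
      = acc + pvS (pvRng l 10) (fun m => pvS (pvRng m 10) (fun n => pvFA mn mx i j k l m n)) :=
  foldl_S _ _ _ _ (fun m _ acc' => innerA_eq mn mx i j k l m _ (pvRng_pairwise m 10) acc')

theorem lemA4 (mn mx i j k acc : Int) :
    (pvRng k 10).foldl (fun valid l =>
      (pvRng l 10).foldl (fun valid m => innerA mn mx i j k l m (pvRng m 10) valid) valid) acc
      = acc + pvS (pvRng k 10) (fun l => pvS (pvRng l 10) (fun m => pvS (pvRng m 10) (fun n =>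
          pvFA mn mx i j k l m n))) :=
  foldl_S _ _ _ _ (fun l _ acc' => lemA5 mn mx i j k l acc')

theorem lemA3 (mn mx i j acc : Int) :
    (pvRng j 10).foldl (fun valid k =>
      (pvRng k 10).foldl (fun valid l =>
        (pvRng l 10).foldl (fun valid m => innerA mn mx i j k l m (pvRng m 10) valid) valid) valid) acc
      = acc + pvS (pvRng j 10) (fun k => pvS (pvRng k 10) (fun l => pvS (pvRng l 10) (fun m =>
          pvS (pvRng m 10) (fun n => pvFA mn mx i j k l m n))))  :=
  foldl_S _ _ _ _ (fun k _ acc' => lemA4 mn mx i j k acc')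

theorem lemA2 (mn mx i acc : Int) :
    (pvRng i 10).foldl (fun valid j =>
      (pvRng j 10).foldl (fun valid k =>
        (pvRng k 10).foldl (fun valid l =>
          (pvRng l 10).foldl (fun valid m => innerA mn mx i j k l m (pvRng m 10) valid) valid) valid) valid) acc
      = acc + pvS (pvRng i 10) (fun j => pvS (pvRng j 10) (fun k => pvS (pvRng k 10) (fun l =>
          pvS (pvRng l 10) (fun m => pvS (pvRng m 10) (fun n => pvFA mn mx i j k l m n))))) :=
  foldl_S _ _ _ _ (fun j _ acc' => lemA3 mn mx i j acc')

theorem A_eq_nested (minimum maximum : Int) :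
    crack_code_v2 minimum maximum
      = pvS (pvRng 1 10) (fun i => pvS (pvRng i 10) (fun j => pvS (pvRng j 10) (fun k =>
          pvS (pvRng k 10) (fun l => pvS (pvRng l 10) (fun m => pvS (pvRng m 10) (fun n =>
            pvFA minimum maximum i j k l m n)))))) := by
  unfold crack_code_v2
  simp only [pvRng_def]
  rw [foldl_S _ _ _ _ (fun i _ acc' => lemA2 minimum maximum i acc')]
  rw [zero_add]

def pvAllB (num : Int) : Bool :=
  (PySem.List.pyRange 0 5 1).all (fun p => decide (pvDig num p ≤ pvDig num (p + 1)))

def pvAnyB (num : Int) : Bool :=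
  (PySem.List.pyRange 0 5 1).any (fun p =>
    pvDig num p == pvDig num (p + 1)
    && (p == 0 || pvDig num (p - 1) != pvDig num p)
    && (p == 4 || pvDig num (p + 1) != pvDig num (p + 2)))

def pvOk (num : Int) : Bool := pvAllB num && pvAnyB num

theorem B_eq_S (minimum maximum : Int) :
    crack_code_v2_alt minimum maximum
      = pvS (pvRng (max minimum 111111) (min maximum 999999 + 1))
          (fun x => if pvOk x then 1 else 0) := by
  show (PySem.List.pyRange (max minimum 111111) (min maximum 999999 + 1) 1).foldl
      (fun count num => if pvAllB num then (if pvAnyB num then count + 1 else count) else count) 0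
    = _
  rw [pvRng_def]
  rw [foldl_S _ _ (fun x => if pvOk x then (1:Int) else 0) 0 (fun x _ acc => by
    by_cases h1 : pvAllB x <;> by_cases h2 : pvAnyB x <;> simp [pvOk, h1, h2])]
  rw [zero_add]

theorem pvDig_eq (x : Int) :
    pvDig x 0 = x / 100000 % 10 ∧ pvDig x 1 = x / 10000 % 10 ∧ pvDig x 2 = x / 1000 % 10 ∧
    pvDig x 3 = x / 100 % 10 ∧ pvDig x 4 = x / 10 % 10 ∧ pvDig x 5 = x % 10 := by
  refine ⟨?_, ?_, ?_, ?_, ?_, ?_⟩ <;>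
    · unfold pvDig
      norm_num [Int.toNat]

theorem pvAllB_num6 (x i j k l m n : Int)
    (hd0 : x / 100000 % 10 = i) (hd1 : x / 10000 % 10 = j) (hd2 : x / 1000 % 10 = k)
    (hd3 : x / 100 % 10 = l) (hd4 : x / 10 % 10 = m) (hd5 : x % 10 = n) :
    pvAllB x = (decide (i ≤ j) && decide (j ≤ k) && decide (k ≤ l) && decide (l ≤ m) && decide (m ≤ n)) := by
  obtain ⟨e0, e1, e2, e3, e4, e5⟩ := pvDig_eq x
  simp only [pvAllB, show PySem.List.pyRange 0 5 1 = [0, 1, 2, 3, 4] from rfl,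
    List.all_cons, List.all_nil]
  norm_num [e0, e1, e2, e3, e4, e5, hd0, hd1, hd2, hd3, hd4, hd5]
  simp [Bool.and_assoc]

theorem pvAnyB_num6 (x i j k l m n : Int)
    (hd0 : x / 100000 % 10 = i) (hd1 : x / 10000 % 10 = j) (hd2 : x / 1000 % 10 = k)
    (hd3 : x / 100 % 10 = l) (hd4 : x / 10 % 10 = m) (hd5 : x % 10 = n) :
    pvAnyB x = pvCondA i j k l m n := by
  obtain ⟨e0, e1, e2, e3, e4, e5⟩ := pvDig_eq x
  simp only [pvAnyB, show PySem.List.pyRange 0 5 1 = [0, 1, 2, 3, 4] from rfl,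
    List.any_cons, List.any_nil]
  norm_num [e0, e1, e2, e3, e4, e5, hd0, hd1, hd2, hd3, hd4, hd5, pvCondA]
  cases hab : (i == j) <;> cases hbc : (j == k) <;> cases hcd : (k == l)
    <;> cases hde : (l == m) <;> cases hef : (m == n)
    <;> simp [hab, hbc, hcd, hde, hef, Bool.or_assoc]

theorem pvOk_below (x : Int) (h1 : 100000 ≤ x) (h2 : x < 111111) : pvOk x = false := by
  have hA := pvAllB_num6 x _ _ _ _ _ _ rfl rfl rfl rfl rfl rfl
  by_cases h : pvAllB x
  · exfalso
    rw [hA] at h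
    simp only [Bool.and_eq_true, decide_eq_true_eq] at h
    have c1 : x / 10 / 10 = x / 100 := by rw [Int.ediv_ediv_of_nonneg (by norm_num)]; norm_num
    have c2 : x / 100 / 10 = x / 1000 := by rw [Int.ediv_ediv_of_nonneg (by norm_num)]; norm_num
    have c3 : x / 1000 / 10 = x / 10000 := by rw [Int.ediv_ediv_of_nonneg (by norm_num)]; norm_num
    have c4 : x / 10000 / 10 = x / 100000 := by rw [Int.ediv_ediv_of_nonneg (by norm_num)]; norm_num
    have c5 : x / 100000 / 10 = x / 1000000 := by rw [Int.ediv_ediv_of_nonneg (by norm_num)]; norm_num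
    omega
  · simp [pvOk, h]

theorem leafB (mn mx i j k l m n : Int)
    (hi : 1 ≤ i) (hi' : i < 10) (hj : 0 ≤ j) (hj' : j < 10) (hk : 0 ≤ k) (hk' : k < 10)
    (hl : 0 ≤ l) (hl' : l < 10) (hm : 0 ≤ m) (hm' : m < 10) (hn : 0 ≤ n) (hn' : n < 10) :
    (if pvBnd mn mx (pvNum6 i j k l m n) && pvOk (pvNum6 i j k l m n) then (1 : Int) else 0)
      = if i ≤ j then (if j ≤ k then (if k ≤ l then (if l ≤ m then (if m ≤ n then
          pvFA mn mx i j k l m n else 0) else 0) else 0) else 0) else 0 := by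
  have hd0 : pvNum6 i j k l m n / 100000 % 10 = i := by unfold pvNum6; omega
  have hd1 : pvNum6 i j k l m n / 10000 % 10 = j := by unfold pvNum6; omega
  have hd2 : pvNum6 i j k l m n / 1000 % 10 = k := by unfold pvNum6; omega
  have hd3 : pvNum6 i j k l m n / 100 % 10 = l := by unfold pvNum6; omega
  have hd4 : pvNum6 i j k l m n / 10 % 10 = m := by unfold pvNum6; omega
  have hd5 : pvNum6 i j k l m n % 10 = n := by unfold pvNum6; omega
  have hAll := pvAllB_num6 _ i j k l m n hd0 hd1 hd2 hd3 hd4 hd5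
  have hAny := pvAnyB_num6 _ i j k l m n hd0 hd1 hd2 hd3 hd4 hd5
  unfold pvOk pvFA
  rw [hAll, hAny]
  by_cases h1 : i ≤ j <;> by_cases h2 : j ≤ k <;> by_cases h3 : k ≤ l
    <;> by_cases h4 : l ≤ m <;> by_cases h5 : m ≤ n
    <;> simp [h1, h2, h3, h4, h5]

theorem B_eq_full (mn mx : Int) :
    crack_code_v2_alt mn mx
      = pvS (pvRng 100000 1000000) (fun x => if pvBnd mn mx x && pvOk x then 1 else 0) := by
  rw [B_eq_S]
  have hsplit : pvRng 100000 1000000 = pvRng 100000 111111 ++ pvRng 111111 1000000 := by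
    unfold pvRng; exact PySem.List.pyRange_one_append _ _ _ (by norm_num) (by norm_num)
  rw [hsplit, pvS_append]
  rw [pvS_zero (pvRng 100000 111111) _ (fun x hx => by
    have hb := PySem.List.mem_pyRange_one.mp hx
    rw [pvOk_below x hb.1 hb.2]
    simp)]
  rw [zero_add]
  by_cases hc : max mn 111111 ≤ min mx 999999 + 1
  · have h2 : pvRng 111111 1000000
        = pvRng 111111 (max mn 111111)
          ++ (pvRng (max mn 111111) (min mx 999999 + 1) ++ pvRng (min mx 999999 + 1) 1000000) := by
      unfold pvRng
      rw [← PySem.List.pyRange_one_append (max mn 111111) (min mx 999999 + 1) 1000000 hc (by omega)]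
      exact PySem.List.pyRange_one_append _ _ _ (by omega) (by omega)
    rw [h2, pvS_append, pvS_append]
    rw [pvS_zero (pvRng 111111 (max mn 111111)) _ (fun x hx => by
      have hb := PySem.List.mem_pyRange_one.mp hx
      have hmn : ¬ (mn ≤ x) := by omega
      simp [pvBnd, hmn])]
    rw [pvS_zero (pvRng (min mx 999999 + 1) 1000000) _ (fun x hx => by
      have hb := PySem.List.mem_pyRange_one.mp hx
      have hmx : ¬ (x ≤ mx) := by omega
      simp [pvBnd, hmx])]
    rw [zero_add, add_zero]
    exact pvS_congr _ _ _ (fun x hx => by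
      have hb := PySem.List.mem_pyRange_one.mp hx
      have h1 : mn ≤ x := by omega
      have h2 : x ≤ mx := by omega
      simp [pvBnd, h1, h2])
  · rw [show pvRng (max mn 111111) (min mx 999999 + 1) = [] from by
      unfold pvRng; exact PySem.List.pyRange_one_eq_nil (by omega)]
    rw [show pvS [] (fun x => if pvOk x then (1 : Int) else 0) = 0 from rfl]
    exact (pvS_zero _ _ (fun x hx => by
      have hb := PySem.List.mem_pyRange_one.mp hx
      have hd : ¬ mn ≤ x ∨ ¬ x ≤ mx := by omega
      rcases hd with h | h <;> simp [pvBnd, h])).symm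

theorem pvS_dec' (a b a' b' : Int) (ha : a' = 10 * a) (hb : b' = 10 * b) (f : Int → Int) :
    pvS (pvRng a' b') f = pvS (pvRng a b) (fun q => pvS (pvRng 0 10) (fun r => f (10 * q + r))) := by
  subst ha hb; exact pvS_dec a b f

theorem B_eq_nested (mn mx : Int) :
    crack_code_v2_alt mn mx
      = pvS (pvRng 1 10) (fun i => pvS (pvRng 0 10) (fun j => pvS (pvRng 0 10) (fun k =>
          pvS (pvRng 0 10) (fun l => pvS (pvRng 0 10) (fun m => pvS (pvRng 0 10) (fun n =>
            if pvBnd mn mx (10 * (10 * (10 * (10 * (10 * i + j) + k) + l) + m) + n)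
                && pvOk (10 * (10 * (10 * (10 * (10 * i + j) + k) + l) + m) + n)
            then 1 else 0)))))) := by
  rw [B_eq_full,
      pvS_dec' 10000 100000 100000 1000000 (by norm_num) (by norm_num),
      pvS_dec' 1000 10000 10000 100000 (by norm_num) (by norm_num),
      pvS_dec' 100 1000 1000 10000 (by norm_num) (by norm_num),
      pvS_dec' 10 100 100 1000 (by norm_num) (by norm_num),
      pvS_dec' 1 10 10 100 (by norm_num) (by norm_num)]

def pvCanon (mn mx : Int) : Int :=
  pvS (pvRng 1 10) (fun i => pvS (pvRng 0 10) (fun j => if i ≤ j then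
    pvS (pvRng 0 10) (fun k => if j ≤ k then
      pvS (pvRng 0 10) (fun l => if k ≤ l then
        pvS (pvRng 0 10) (fun m => if l ≤ m then
          pvS (pvRng 0 10) (fun n => if m ≤ n then pvFA mn mx i j k l m n else 0)
        else 0)
      else 0)
    else 0)
  else 0))

theorem A_canon (mn mx : Int) :
    pvS (pvRng 1 10) (fun i => pvS (pvRng i 10) (fun j => pvS (pvRng j 10) (fun k =>
      pvS (pvRng k 10) (fun l => pvS (pvRng l 10) (fun m => pvS (pvRng m 10) (fun n =>
        pvFA mn mx i j k l m n))))))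
      = pvCanon mn mx := by
  unfold pvCanon
  apply pvS_congr; intro i hi
  have hib := PySem.List.mem_pyRange_one.mp hi
  rw [pvS_lev i (by omega) (by omega)]
  apply pvS_congr; intro j hj
  have hjb := PySem.List.mem_pyRange_one.mp hj
  by_cases hij : i ≤ j
  · rw [if_pos hij, if_pos hij, pvS_lev j (by omega) (by omega)]
    apply pvS_congr; intro k hk
    have hkb := PySem.List.mem_pyRange_one.mp hk
    by_cases hjk : j ≤ k
    · rw [if_pos hjk, if_pos hjk, pvS_lev k (by omega) (by omega)]
      apply pvS_congr; intro l hl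
      have hlb := PySem.List.mem_pyRange_one.mp hl
      by_cases hkl : k ≤ l
      · rw [if_pos hkl, if_pos hkl, pvS_lev l (by omega) (by omega)]
        apply pvS_congr; intro m hm
        have hmb := PySem.List.mem_pyRange_one.mp hm
        by_cases hlm : l ≤ m
        · rw [if_pos hlm, if_pos hlm, pvS_lev m (by omega) (by omega)]
        · rw [if_neg hlm, if_neg hlm]
      · rw [if_neg hkl, if_neg hkl]
    · rw [if_neg hjk, if_neg hjk]
  · rw [if_neg hij, if_neg hij]

theorem B_canon (mn mx : Int) :
    pvS (pvRng 1 10) (fun i => pvS (pvRng 0 10) (fun j => pvS (pvRng 0 10) (fun k =>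
      pvS (pvRng 0 10) (fun l => pvS (pvRng 0 10) (fun m => pvS (pvRng 0 10) (fun n =>
        if pvBnd mn mx (10 * (10 * (10 * (10 * (10 * i + j) + k) + l) + m) + n)
            && pvOk (10 * (10 * (10 * (10 * (10 * i + j) + k) + l) + m) + n)
        then 1 else 0))))))
      = pvCanon mn mx := by
  have step1 :
      pvS (pvRng 1 10) (fun i => pvS (pvRng 0 10) (fun j => pvS (pvRng 0 10) (fun k =>
        pvS (pvRng 0 10) (fun l => pvS (pvRng 0 10) (fun m => pvS (pvRng 0 10) (fun n =>
          if pvBnd mn mx (10 * (10 * (10 * (10 * (10 * i + j) + k) + l) + m) + n)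
              && pvOk (10 * (10 * (10 * (10 * (10 * i + j) + k) + l) + m) + n)
          then 1 else 0))))))
        = pvS (pvRng 1 10) (fun i => pvS (pvRng 0 10) (fun j => pvS (pvRng 0 10) (fun k =>
            pvS (pvRng 0 10) (fun l => pvS (pvRng 0 10) (fun m => pvS (pvRng 0 10) (fun n =>
              if i ≤ j then (if j ≤ k then (if k ≤ l then (if l ≤ m then (if m ≤ n then
                pvFA mn mx i j k l m n else 0) else 0) else 0) else 0) else 0)))))) := by
    apply pvS_congr; intro i hi
    have hib := PySem.List.mem_pyRange_one.mp hi
    apply pvS_congr; intro j hj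
    have hjb := PySem.List.mem_pyRange_one.mp hj
    apply pvS_congr; intro k hk
    have hkb := PySem.List.mem_pyRange_one.mp hk
    apply pvS_congr; intro l hl
    have hlb := PySem.List.mem_pyRange_one.mp hl
    apply pvS_congr; intro m hm
    have hmb := PySem.List.mem_pyRange_one.mp hm
    apply pvS_congr; intro n hn
    have hnb := PySem.List.mem_pyRange_one.mp hn
    have hX : 10 * (10 * (10 * (10 * (10 * i + j) + k) + l) + m) + n = pvNum6 i j k l m n := by
      unfold pvNum6; ring
    rw [hX]
    exact leafB mn mx i j k l m n (by omega) (by omega) (by omega) (by omega) (by omega)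
      (by omega) (by omega) (by omega) (by omega) (by omega) (by omega) (by omega)
  rw [step1]
  unfold pvCanon
  simp only [pvS_guard]

theorem main_eq (minimum maximum : Int) :
    crack_code_v2 minimum maximum = crack_code_v2_alt minimum maximum := by
  rw [A_eq_nested, A_canon, B_eq_nested, B_canon]

-- ===== VERDICT (by name: the statement is the Claim_ definition above) =====
theorem crack_code_v2_spec : Claim_equal_crack_code_v2 := by
  intro minimum maximum _
  unfold Spec_crack_code_v2
  exact main_eq minimum maximum
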